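-- pv_equiv track=rewrite | github.com/snefrukai/15-112 | hw3.py | topLevelFunctionNames
-- ===== SOURCE A (Python) =====
-- def topLevelFunctionNames(code):
--     quotes_triple = ['"""', "'''"]
--     quotes_single = ['"', "'"]
--     quotes = quotes_triple + quotes_single
--     code_temp = ''
--
--     # def pop_quotes(s): #* pop single quote content
--     #     for c in quotes:
--     #         i = s.find(c)
--     #         if i != -1:  # and s[i:i + 4] not in ('"""', "'''"):
--     #             left = s[:i]
--     #             mid = s[i + len(c):]
--     #             right = mid[mid.find(c) + len(c):] if c in mid else mid
--     #             s = left + right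
--     #     return s
--
--     # quotes = '"""' + "'''" #* pop triple quote content
--     # for c in ('"""', "'''"):
--     #     while c in code:
--     #         i = code.find(c)
--     #         left = code[:i]
--     #         mid = code[i + 3:]
--     #         right = mid[mid.find(c) + 3:]
--     #         # ic(left, right)
--     #         code = left + right
--     # ic(code)
--
--     def check_comment(s):
--         i = s.find('#')
--         for c in quotes_triple:
--             if -1 < s.find(c) < i: return False
--         for c in quotes_single:
--             if c in s[:i] and c in s[i + len(c):]: return False
--         return True
--
--     def check_triple(s):
--         for c in quotes_triple:
--             if c in s and s.count(c) % 2 != 0: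
--                 return True
--         return False
--
--     valid_triple = None
--     for line in code.splitlines():
--         if valid_triple and check_triple(line):
--             valid_triple = False
--             continue
--         else:
--             valid_comment = check_comment(line)
--             if not valid_comment:
--                 valid_triple = check_triple(line)
--             code_temp += '\n' + line if code_temp != '' else line
--             # ic(valid_comment, valid_triple)
--     # ic(code_temp)
--
--     s = ''
--     for line in code_temp.splitlines():  #* add func name
--         if line[:3] != 'def':
--             continue
--         else:
--             func = line[4:line.find('(')]
--             if func not in s:
--                 s += '.' + func if s != '' else func
--     return s
-- ===== SOURCE B (Python) =====
-- def topLevelFunctionNames(code):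
--     # Single pass: fuse line filtering and name extraction; no intermediate code_temp string.
--     triples = ('"""', "'''")
--
--     def odd_triple(s):
--         return any(s.count(c) % 2 != 0 for c in triples)
--
--     def is_plain_comment(s):
--         i = s.find('#')
--         if any(-1 < s.find(c) < i for c in triples):
--             return False
--         return not any(c in s[:i] and c in s[i + 1:] for c in ('"', "'"))
--
--     in_triple = False
--     names = ''
--     for line in code.splitlines():
--         if in_triple and odd_triple(line):
--             in_triple = False
--             continue
--         if not is_plain_comment(line):
--             in_triple = odd_triple(line)
--         if line[:3] == 'def':
--             func = line[4:line.find('(')]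
--             if func not in names:
--                 names += '.' + func if names != '' else func
--     return names
-- ===== Notes on version B (the rewrite author's own statement) =====
-- stated objective: simpler
-- what changed: B fuses A's two sequential passes into one loop over code.splitlines(): instead of concatenating surviving lines into an intermediate code_temp string and re-splitting it, each surviving line is immediately checked for a 'def' prefix and its name appended, so the intermediate string and the second splitlines pass disappear.
import Mathlib
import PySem

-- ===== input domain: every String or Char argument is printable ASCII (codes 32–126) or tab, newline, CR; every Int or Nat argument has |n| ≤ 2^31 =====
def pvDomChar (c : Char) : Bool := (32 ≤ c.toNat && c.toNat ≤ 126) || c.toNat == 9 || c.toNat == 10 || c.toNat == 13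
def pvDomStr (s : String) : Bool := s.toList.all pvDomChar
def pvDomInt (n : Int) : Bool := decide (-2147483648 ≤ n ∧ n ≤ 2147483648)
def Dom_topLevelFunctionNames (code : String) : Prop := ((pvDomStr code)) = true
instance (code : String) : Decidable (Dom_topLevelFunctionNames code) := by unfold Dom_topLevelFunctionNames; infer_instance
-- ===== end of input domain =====

-- B is a single fused pass over the lines (no intermediate code_temp string); same return value, proved equal.

-- ===== PORT A =====
-- A-side helpers: the quote lists and check_comment / check_triple, on List Char
def pvAQuotesTriple : List (List Char) := [['"','"','"'], ['\'','\'','\'']]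
def pvAQuotesSingle : List (List Char) := [['"'], ['\'']]

-- def check_comment(s): early-return for-loops ported as List.any over the quote lists
def pvACheckComment (s : List Char) : Bool :=
  let i := PySem.Chars.find s ['#']
  if pvAQuotesTriple.any (fun c => decide (-1 < PySem.Chars.find s c ∧ PySem.Chars.find s c < i)) then false
  else if pvAQuotesSingle.any (fun c =>
      PySem.Chars.isIn c (PySem.List.slice s none (some i)) &&
      PySem.Chars.isIn c (PySem.List.slice s (some (i + (c.length : Int))) none)) then false
  else true

-- def check_triple(s)
def pvACheckTriple (s : List Char) : Bool :=
  pvAQuotesTriple.any (fun c => PySem.Chars.isIn c s && decide (PySem.Chars.count s c % 2 ≠ 0))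

-- first loop body: valid_triple (None/True/False as Option Bool, tested for truthiness) and code_temp
def pvATruthy (vt : Option Bool) : Bool := vt == some true

def pvAStep1 (st : Option Bool × List Char) (line : List Char) : Option Bool × List Char :=
  if pvATruthy st.1 && pvACheckTriple line then (some false, st.2)   -- continue
  else
    let vt := if !pvACheckComment line then some (pvACheckTriple line) else st.1
    (vt, st.2 ++ (if st.2 ≠ [] then '\n' :: line else line))

-- second loop body: collect function names into s
def pvAStep2 (s : List Char) (line : List Char) : List Char :=
  if PySem.List.slice line none (some 3) ≠ ['d','e','f'] then s      -- continue
  else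
    let func := PySem.List.slice line (some 4) (some (PySem.Chars.find line ['(']))
    if PySem.Chars.isIn func s then s
    else s ++ (if s ≠ [] then '.' :: func else func)

def topLevelFunctionNames (code : String) : String :=
  let st := (PySem.Chars.splitlines code.toList).foldl pvAStep1 (none, [])
  String.ofList ((PySem.Chars.splitlines st.2).foldl pvAStep2 [])

-- ===== PORT B =====
-- B-side helpers (see Source B): odd_triple / is_plain_comment
def pvBTriples : List (List Char) := [['"','"','"'], ['\'','\'','\'']]

def pvBOddTriple (s : List Char) : Bool :=
  pvBTriples.any (fun c => decide (PySem.Chars.count s c % 2 ≠ 0))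

def pvBIsPlainComment (s : List Char) : Bool :=
  let i := PySem.Chars.find s ['#']
  if pvBTriples.any (fun c => decide (-1 < PySem.Chars.find s c ∧ PySem.Chars.find s c < i)) then false
  else !([['"'], ['\'']].any (fun c =>
      PySem.Chars.isIn c (PySem.List.slice s none (some i)) &&
      PySem.Chars.isIn c (PySem.List.slice s (some (i + (c.length : Int))) none)))

-- the fused loop body: (in_triple, names)
def pvBStep (st : Bool × List Char) (line : List Char) : Bool × List Char :=
  if st.1 && pvBOddTriple line then (false, st.2)                    -- continue
  else
    let inT := if !pvBIsPlainComment line then pvBOddTriple line else st.1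
    if PySem.List.slice line none (some 3) = ['d','e','f'] then
      let func := PySem.List.slice line (some 4) (some (PySem.Chars.find line ['(']))
      if PySem.Chars.isIn func st.2 then (inT, st.2)
      else (inT, st.2 ++ (if st.2 ≠ [] then '.' :: func else func))
    else (inT, st.2)

def topLevelFunctionNames_alt (code : String) : String :=
  String.ofList ((PySem.Chars.splitlines code.toList).foldl pvBStep (false, [])).2

-- ===== PRECONDITION & SPEC =====
def Spec_topLevelFunctionNames (code : String) (out : String) : Prop := out = topLevelFunctionNames_alt code
instance (code : String) (out : String) : Decidable (Spec_topLevelFunctionNames code out) := by unfold Spec_topLevelFunctionNames; infer_instance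

-- ===== CLAIM (what is proved, stated in full; the proofs are below) =====
def Claim_equal_topLevelFunctionNames : Prop := ∀ (code : String), Dom_topLevelFunctionNames code → Spec_topLevelFunctionNames code (topLevelFunctionNames code)

-- ===== LEMMAS AND PROOFS =====

-- B's helpers agree with A's
lemma pvCheckComment_eq (s : List Char) : pvBIsPlainComment s = pvACheckComment s := by
  unfold pvBIsPlainComment pvACheckComment pvBTriples pvAQuotesTriple pvAQuotesSingle
  simp only []
  split
  · rfl
  · split
    · rename_i h2; rw [h2]; rfl
    · rename_i h2; simp only [Bool.not_eq_true] at h2; rw [h2]; rfl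

lemma pvCount_go_of_not_infix (sub : List Char) : ∀ (fuel : ℕ) (s : List Char) (acc : ℕ),
    (¬ ∃ j, sub <+: s.drop j) → PySem.Chars.count.go sub fuel s acc = acc := by
  intro fuel s acc
  induction fuel, s, acc using PySem.Chars.count.go.induct (sub := sub) with
  | case1 x acc => intro h; rw [PySem.Chars.count.go]
  | case2 t acc h0 =>
      intro h
      rw [PySem.Chars.count.go]
      exact h0
  | case3 fuel head t acc hpre ih =>
      intro h
      exact absurd ⟨0, by simpa [List.isPrefixOf_iff_prefix] using hpre⟩ h
  | case4 fuel head t acc hpre ih =>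
      intro h
      rw [PySem.Chars.count.go]
      split
      · rename_i hp; exact absurd hp hpre
      · exact ih (fun ⟨j, hj⟩ => h ⟨j + 1, by simpa using hj⟩)

lemma pvIsIn_of_count_odd (s q : List Char) (hq : q ≠ []) (h : PySem.Chars.count s q % 2 ≠ 0) :
    PySem.Chars.isIn q s = true := by
  by_cases hin : PySem.Chars.isIn q s = true
  · exact hin
  · exfalso
    apply h
    have hni : ¬ ∃ j, q <+: s.drop j := by
      intro hj
      exact hin ((PySem.Chars.exists_prefix_drop_iff_isIn _ _).mp hj)
    rw [PySem.Chars.count, if_neg (by simpa using hq), pvCount_go_of_not_infix q _ _ _ hni]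

lemma pvCheckTriple_eq (s : List Char) : pvBOddTriple s = pvACheckTriple s := by
  have key : ∀ q, q ≠ [] →
      (PySem.Chars.isIn q s && decide (PySem.Chars.count s q % 2 ≠ 0))
        = decide (PySem.Chars.count s q % 2 ≠ 0) := by
    intro q hq
    by_cases hodd : PySem.Chars.count s q % 2 ≠ 0
    · rw [pvIsIn_of_count_odd s q hq hodd, Bool.true_and]
    · have hd : decide (PySem.Chars.count s q % 2 ≠ 0) = false := by simpa using hodd
      rw [hd, Bool.and_false]
  unfold pvBOddTriple pvACheckTriple pvBTriples pvAQuotesTriple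
  rw [List.any_cons, List.any_cons, List.any_cons, List.any_cons, List.any_nil, List.any_nil]
  rw [key _ (by decide), key _ (by decide)]

-- the lines A's first loop keeps (as a pure function of valid_triple and the line list)
def pvKept (vt : Option Bool) : List (List Char) → List (List Char)
  | [] => []
  | l :: ls =>
    if pvATruthy vt && pvACheckTriple l then pvKept (some false) ls
    else l :: pvKept (if !pvACheckComment l then some (pvACheckTriple l) else vt) ls

-- how A's first loop builds code_temp
def pvAppend (ct : List Char) (L : List (List Char)) : List Char :=
  L.foldl (fun ct l => ct ++ (if ct ≠ [] then '\n' :: l else l)) ct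

lemma pvPhase1_eq : ∀ (ls : List (List Char)) (vt : Option Bool) (ct : List Char),
    (ls.foldl pvAStep1 (vt, ct)).2 = pvAppend ct (pvKept vt ls) := by
  intro ls
  induction ls with
  | nil => intro vt ct; rfl
  | cons l ls ih =>
      intro vt ct
      rw [List.foldl_cons, pvAStep1, pvKept]
      by_cases hc : (pvATruthy vt && pvACheckTriple l) = true
      · rw [if_pos hc, if_pos hc]
        exact ih (some false) ct
      · rw [if_neg hc, if_neg hc]
        rw [ih _ _]
        rw [show pvAppend ct (l :: pvKept (if !pvACheckComment l then some (pvACheckTriple l) else vt) ls) =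
              pvAppend (ct ++ if ct ≠ [] then '\n' :: l else l)
                (pvKept (if !pvACheckComment l then some (pvACheckTriple l) else vt) ls) from rfl]

lemma pvPhase2_eq : ∀ (ls : List (List Char)) (vt : Option Bool) (s : List Char),
    (ls.foldl pvBStep (pvATruthy vt, s)).2 = (pvKept vt ls).foldl pvAStep2 s := by
  intro ls
  induction ls with
  | nil => intro vt s; rfl
  | cons l ls ih =>
      intro vt s
      rw [List.foldl_cons]
      by_cases hc : (pvATruthy vt && pvACheckTriple l) = true
      · rw [show pvBStep (pvATruthy vt, s) l = (false, s) from by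
          simp only [pvBStep]; rw [if_pos (by rwa [pvCheckTriple_eq])]]
        rw [pvKept, if_pos hc]
        exact ih (some false) s
      · have htr : (if !pvBIsPlainComment l then pvBOddTriple l else pvATruthy vt)
            = pvATruthy (if !pvACheckComment l then some (pvACheckTriple l) else vt) := by
          rw [pvCheckComment_eq, pvCheckTriple_eq]
          by_cases hcom : (!pvACheckComment l) = true
          · rw [if_pos hcom, if_pos hcom]; cases pvACheckTriple l <;> rfl
          · rw [if_neg hcom, if_neg hcom]
        have hstep : pvBStep (pvATruthy vt, s) l =
            (pvATruthy (if !pvACheckComment l then some (pvACheckTriple l) else vt), pvAStep2 s l) := by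
          simp only [pvBStep, pvAStep2]
          rw [if_neg (by rw [pvCheckTriple_eq]; exact hc)]
          by_cases hdef : PySem.List.slice l none (some 3) = ['d','e','f']
          · rw [if_pos hdef, if_neg (not_not_intro hdef)]
            by_cases hin : PySem.Chars.isIn (PySem.List.slice l (some 4) (some (PySem.Chars.find l ['(']))) s = true
            · rw [if_pos hin, if_pos hin, htr]
            · rw [if_neg hin, if_neg hin, htr]
          · rw [if_neg hdef, if_pos hdef, htr]
        rw [hstep, pvKept, if_neg hc, List.foldl_cons]
        exact ih _ (pvAStep2 s l)

lemma pvKept_subset : ∀ (ls : List (List Char)) (vt : Option Bool) (l : List Char),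
    l ∈ pvKept vt ls → l ∈ ls := by
  intro ls
  induction ls with
  | nil => intro vt l h; simp [pvKept] at h
  | cons x ls ih =>
      intro vt l h
      rw [pvKept] at h
      split at h
      · exact List.mem_cons_of_mem _ (ih _ _ h)
      · rcases List.mem_cons.mp h with h' | h'
        · simp [h']
        · exact List.mem_cons_of_mem _ (ih _ _ h')

-- empty lines do not matter to the second loop
lemma pvStep2_empty (s : List Char) : pvAStep2 s [] = s := by
  rw [pvAStep2, if_pos (by decide)]

lemma pvFoldl_filter (L : List (List Char)) : ∀ (s : List Char),
    L.foldl pvAStep2 s = (L.filter (fun l => !l.isEmpty)).foldl pvAStep2 s := by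
  induction L with
  | nil => intro s; rfl
  | cons l L ih =>
      intro s
      by_cases hl : l = []
      · subst hl
        simpa [List.filter_cons, pvStep2_empty] using ih s
      · rw [List.foldl_cons, List.filter_cons, if_pos (by simpa using hl), List.foldl_cons, ih]

lemma pvFilter_dropWhile (L : List (List Char)) :
    (L.dropWhile (fun l => l.isEmpty)).filter (fun l => !l.isEmpty) = L.filter (fun l => !l.isEmpty) := by
  induction L with
  | nil => rfl
  | cons l L ih =>
      by_cases hl : l = []
      · subst hl; simpa using ih
      · simp [hl]

-- code_temp as a '\n'-join
def pvJoin : List (List Char) → List Char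
  | [] => []
  | m :: r => m ++ r.flatMap (fun l => '\n' :: l)

lemma pvAppend_ne : ∀ (L : List (List Char)) (ct : List Char), ct ≠ [] →
    pvAppend ct L = ct ++ L.flatMap (fun l => '\n' :: l) := by
  intro L
  induction L with
  | nil => intro ct h; simp [pvAppend]
  | cons l L ih =>
      intro ct h
      rw [pvAppend, List.foldl_cons, if_pos h]
      rw [show (List.foldl (fun ct l => ct ++ if ct ≠ [] then '\n' :: l else l) (ct ++ '\n' :: l) L) =
            pvAppend (ct ++ '\n' :: l) L from rfl]
      rw [ih _ (by simp), List.flatMap_cons]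
      simp

lemma pvAppend_nil : ∀ (K : List (List Char)),
    pvAppend [] K = pvJoin (K.dropWhile (fun l => l.isEmpty)) := by
  intro K
  induction K with
  | nil => rfl
  | cons l K ih =>
      by_cases hl : l = []
      · subst hl
        rw [show pvAppend [] ([] :: K) = pvAppend [] K from by simp [pvAppend], ih]
        simp
      · rw [show pvAppend [] (l :: K) = pvAppend l K from by simp [pvAppend],
            pvAppend_ne K l hl, List.dropWhile_cons, if_neg (by simpa using hl), pvJoin]

-- splitlines, reasoned about through a clean clone of its worker
def pvIsB (c : Char) : Bool :=
  decide (c.toNat = 10) || decide (c.toNat = 13) || decide (c.toNat = 11) || decide (c.toNat = 12) ||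
  decide (c.toNat = 28) || decide (c.toNat = 29) || decide (c.toNat = 30) || decide (c.toNat = 133) ||
  decide (c.toNat = 8232) || decide (c.toNat = 8233)

def pvSL : List Char → List Char → List (List Char) → List (List Char)
  | [], cur, acc => if cur.isEmpty then acc.reverse else (cur.reverse :: acc).reverse
  | '\r' :: '\n' :: rest, cur, acc => pvSL rest [] (cur.reverse :: acc)
  | c :: rest, cur, acc => if pvIsB c then pvSL rest [] (cur.reverse :: acc) else pvSL rest (c :: cur) acc

lemma pvSL_eq : ∀ (s cur : List Char) (acc : List (List Char)),
    PySem.Chars.splitlines.go pvIsB s cur acc = pvSL s cur acc := by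
  intro s cur acc
  induction s, cur, acc using pvSL.induct with
  | _ => rw [PySem.Chars.splitlines.go]; (try simp_all [pvSL]); (try assumption)

lemma pvSplitlines_eq (s : List Char) : PySem.Chars.splitlines s = pvSL s [] [] := by
  rw [show PySem.Chars.splitlines s = PySem.Chars.splitlines.go pvIsB s [] [] from rfl, pvSL_eq]


lemma pvSL_acc : ∀ (s cur : List Char) (acc : List (List Char)),
    pvSL s cur acc = acc.reverse ++ pvSL s cur [] := by
  intro s cur acc
  refine pvSL.induct (motive := fun s cur _ => ∀ acc, pvSL s cur acc = acc.reverse ++ pvSL s cur []) ?_ ?_ ?_ ?_ ?_ s cur [] acc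
  · intro cur acc h acc'; simp [pvSL, h]
  · intro cur acc h acc'; simp [pvSL, h]
  · intro rest cur acc ih acc'
    rw [pvSL, pvSL, ih (cur.reverse :: acc'), ih [cur.reverse]]
    simp
  · intro c rest cur acc h hb ih acc'
    rw [pvSL.eq_3 _ _ _ _ h, pvSL.eq_3 _ _ _ _ h, if_pos hb, if_pos hb,
        ih (cur.reverse :: acc'), ih [cur.reverse]]
    simp
  · intro c rest cur acc h hb ih acc'
    rw [pvSL.eq_3 _ _ _ _ h, pvSL.eq_3 _ _ _ _ h, if_neg hb, if_neg hb, ih acc']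

lemma pvSL_breakfree : ∀ (s cur : List Char) (acc : List (List Char)),
    (∀ c ∈ cur, pvIsB c = false) → (∀ l ∈ acc, ∀ c ∈ l, pvIsB c = false) →
    ∀ l ∈ pvSL s cur acc, ∀ c ∈ l, pvIsB c = false := by
  intro s cur acc
  induction s, cur, acc using pvSL.induct with
  | case1 cur acc h =>
      intro hc ha l hl
      simp [pvSL, h] at hl
      exact ha l hl
  | case2 cur acc h =>
      intro hc ha l hl
      have hne : cur ≠ [] := by simpa using h
      simp [pvSL, hne] at hl
      rcases hl with hl | hl
      · exact ha l hl
      · subst hl; intro c hcm; exact hc c (by simpa using hcm)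
  | case3 rest cur acc ih =>
      intro hc ha l hl
      rw [pvSL] at hl
      refine ih (by simp) ?_ l hl
      intro l' hl'; rcases List.mem_cons.mp hl' with h' | h'
      · subst h'; intro c hcm; exact hc c (by simpa using hcm)
      · exact ha l' h'
  | case4 c rest cur acc h hb ih =>
      intro hc ha l hl
      rw [pvSL.eq_3 _ _ _ _ h, if_pos hb] at hl
      refine ih (by simp) ?_ l hl
      intro l' hl'; rcases List.mem_cons.mp hl' with h' | h'
      · subst h'; intro c hcm; exact hc c (by simpa using hcm)
      · exact ha l' h'
  | case5 c rest cur acc h hb ih =>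
      intro hc ha l hl
      rw [pvSL.eq_3 _ _ _ _ h, if_neg hb] at hl
      refine ih ?_ ha l hl
      intro c' hc'
      rcases List.mem_cons.mp hc' with h' | h'
      · subst h'; simpa using hb
      · exact hc c' h'

lemma pvSL_prefix : ∀ (m : List Char), (∀ c ∈ m, pvIsB c = false) →
    ∀ (s cur : List Char) (acc : List (List Char)),
    pvSL (m ++ s) cur acc = pvSL s (m.reverse ++ cur) acc := by
  intro m
  induction m with
  | nil => intro _ s cur acc; simp
  | cons c m ih =>
      intro hm s cur acc
      have hc : pvIsB c = false := hm c (by simp)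
      have hr : c ≠ '\r' := by
        intro h; subst h; simp [pvIsB] at hc
      rw [List.cons_append, pvSL.eq_3, if_neg (by simp [hc])]
      · rw [ih (fun c hc => hm c (by simp [hc])) s (c :: cur) acc]
        simp
      · intro r h1 h2; exact hr h1

lemma pvSplit_cons (m t : List Char) (hm : ∀ c ∈ m, pvIsB c = false) :
    pvSL (m ++ '\n' :: t) [] [] = m :: pvSL t [] [] := by
  have h1 : pvSL (m ++ '\n' :: t) [] [] = pvSL ('\n' :: t) m.reverse [] := by
    simpa using pvSL_prefix m hm ('\n' :: t) [] []
  have h2 : pvSL ('\n' :: t) m.reverse [] = pvSL t [] [m] := by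
    rw [pvSL.eq_3, if_pos (by simp [pvIsB])]
    · simp
    · intro r ha hb; exact absurd ha (by decide)
  have h3 : pvSL t [] [m] = m :: pvSL t [] [] := by
    simpa using pvSL_acc t [] [m]
  rw [h1, h2, h3]

lemma pvSplit_single (m : List Char) (hm : ∀ c ∈ m, pvIsB c = false) (hne : m ≠ []) :
    pvSL m [] [] = [m] := by
  have := pvSL_prefix m hm [] [] []
  simp at this
  rw [this, pvSL, if_neg (by simpa using hne)]
  simp

lemma pvSplit_join (M : List (List Char)) (hM : ∀ l ∈ M, ∀ c ∈ l, pvIsB c = false) :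
    (pvSL (pvJoin M) [] []).filter (fun l => !l.isEmpty) = M.filter (fun l => !l.isEmpty) := by
  induction M with
  | nil => simp [pvJoin, pvSL]
  | cons m M ih =>
      match M with
      | [] =>
          by_cases hne : m = []
          · subst hne; simp [pvJoin, pvSL]
          · rw [pvJoin]
            simp only [List.flatMap_nil, List.append_nil]
            rw [pvSplit_single m (hM m (by simp)) hne]
      | m' :: M' =>
          have hjoin : pvJoin (m :: m' :: M') = m ++ '\n' :: pvJoin (m' :: M') := by
            simp [pvJoin]
          rw [hjoin, pvSplit_cons m _ (hM m (by simp)), List.filter_cons, List.filter_cons,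
              ih (fun l hl => hM l (List.mem_cons_of_mem _ hl))]

-- ===== VERDICT (by name: the statement is the Claim_ definition above) =====
theorem topLevelFunctionNames_spec : Claim_equal_topLevelFunctionNames := by
  intro code _
  unfold Spec_topLevelFunctionNames topLevelFunctionNames topLevelFunctionNames_alt
  show String.ofList (List.foldl pvAStep2 []
      (PySem.Chars.splitlines (List.foldl pvAStep1 (none, []) (PySem.Chars.splitlines code.toList)).2))
    = String.ofList (List.foldl pvBStep (false, []) (PySem.Chars.splitlines code.toList)).2
  congr 1
  have hbf : ∀ l ∈ PySem.Chars.splitlines code.toList, ∀ c ∈ l, pvIsB c = false := by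
    rw [pvSplitlines_eq]
    exact pvSL_breakfree code.toList [] [] (by simp) (by simp)
  rw [pvPhase1_eq (PySem.Chars.splitlines code.toList) none [], pvAppend_nil, pvSplitlines_eq]
  have hK : ∀ l ∈ pvKept none (PySem.Chars.splitlines code.toList), ∀ c ∈ l, pvIsB c = false :=
    fun l hl => hbf l (pvKept_subset _ _ _ hl)
  have hM : ∀ l ∈ (pvKept none (PySem.Chars.splitlines code.toList)).dropWhile (fun l => l.isEmpty),
      ∀ c ∈ l, pvIsB c = false :=
    fun l hl => hK l ((List.dropWhile_sublist _).subset hl)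
  rw [pvFoldl_filter, pvSplit_join _ hM, pvFilter_dropWhile, ← pvFoldl_filter,
      ← pvPhase2_eq (PySem.Chars.splitlines code.toList) none []]
  rfl
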